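-- pv_equiv track=rewrite | github.com/cmajorsolo/Python_Algorithms | palyGround.py | solution
-- ===== SOURCE A (Python) =====
-- def solution(A, B, C, D, E, F):
--     resultArr = [0] * 6
--     numbers = [A, B, C, D, E, F]
--     numbers.sort()
--
--     smallerThan6 = [i for i in numbers if i < 6]
--     biggerThan6 = [i for i in numbers if i >= 6]
--
--     if len(smallerThan6) < 3:
--         return 'NOT POSSIBLE'
--     elif len(smallerThan6) >= 3:
--         resultArr[0] = smallerThan6[0]
--         resultArr[2] = smallerThan6[1]
--         resultArr[4] = smallerThan6[2]
--
--     if resultArr[0] >= 2: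
--         return 'NOT POSSIBLE'
--     else:
--         if len(smallerThan6) > 3:
--             i = len(smallerThan6) - 3
--             if i == 1:
--                 resultArr[1] = smallerThan6[3]
--                 resultArr[3] = biggerThan6[0]
--                 resultArr[5] = biggerThan6[1]
--             elif i == 2:
--                 resultArr[1] = smallerThan6[3]
--                 resultArr[3] = smallerThan6[4]
--                 resultArr[5] = biggerThan6[0]
--             elif i == 3:
--                 resultArr[1] = smallerThan6[3]
--                 resultArr[3] = smallerThan6[4]
--                 resultArr[5] = smallerThan6[5]
--
--         elif len(smallerThan6) == 3:
--             resultArr[1] = biggerThan6[0]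
--             resultArr[3] = biggerThan6[1]
--             resultArr[5] = biggerThan6[2]
--
--
--
--     return str(resultArr[0])+str(resultArr[1])+':'+str(resultArr[2])+str(resultArr[3])+':'+str(resultArr[4])+str(resultArr[5])
-- ===== SOURCE B (Python) =====
-- def solution(A, B, C, D, E, F):
--     n = sorted([A, B, C, D, E, F])
--     if n[2] >= 6 or n[0] >= 2:
--         return 'NOT POSSIBLE'
--     return f'{n[0]}{n[3]}:{n[1]}{n[4]}:{n[2]}{n[5]}'
-- ===== Notes on version B (the rewrite author's own statement) =====
-- stated objective: simpler
-- what changed: B drops A's partition into smallerThan6/biggerThan6 lists and the four-way case analysis on their lengths: after sorting, the three smallest values are the tens digits and the three largest the ones digits, so B checks the two guards (n[2]>=6, n[0]>=2) and formats the sorted sextuple directly.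
import Mathlib
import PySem

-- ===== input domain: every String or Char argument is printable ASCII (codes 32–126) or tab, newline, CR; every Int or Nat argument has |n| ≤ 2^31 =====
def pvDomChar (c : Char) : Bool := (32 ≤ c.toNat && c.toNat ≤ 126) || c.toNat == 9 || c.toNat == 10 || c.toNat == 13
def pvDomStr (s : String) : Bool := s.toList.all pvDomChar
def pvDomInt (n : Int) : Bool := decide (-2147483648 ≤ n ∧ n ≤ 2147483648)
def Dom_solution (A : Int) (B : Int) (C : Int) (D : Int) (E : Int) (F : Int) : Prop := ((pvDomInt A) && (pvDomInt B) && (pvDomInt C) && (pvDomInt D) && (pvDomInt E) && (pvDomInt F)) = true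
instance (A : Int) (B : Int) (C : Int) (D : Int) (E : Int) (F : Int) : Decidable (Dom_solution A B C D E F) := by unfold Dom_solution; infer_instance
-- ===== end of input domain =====

-- B replaces A's smallerThan6/biggerThan6 partition and four-way length case analysis
-- by two guards on the sorted values and a direct formatting of the sorted sextuple (simpler).


-- xs[i]: every index taken in either port is in range (guaranteed by the guards), so the default is never used
def pvIdx (xs : List Int) (i : Int) : Int := (PySem.List.pyGet? xs i).getD 0

-- ===== PORT A =====
def solution (A : Int) (B : Int) (C : Int) (D : Int) (E : Int) (F : Int) : String :=
  let numbers := PySem.List.sorted [A, B, C, D, E, F] (fun x => x) false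
  let smallerThan6 := numbers.filter (fun i => decide (i < 6))
  let biggerThan6 := numbers.filter (fun i => decide (i ≥ 6))
  if smallerThan6.length < 3 then "NOT POSSIBLE"
  else
    -- resultArr[0], resultArr[2], resultArr[4]
    let r0 := pvIdx smallerThan6 0
    let r2 := pvIdx smallerThan6 1
    let r4 := pvIdx smallerThan6 2
    if r0 ≥ 2 then "NOT POSSIBLE"
    else
      let rest :=  -- (resultArr[1], resultArr[3], resultArr[5]); initially (0,0,0)
        if smallerThan6.length > 3 then
          let i : Int := (smallerThan6.length : Int) - 3
          if i = 1 then (pvIdx smallerThan6 3, pvIdx biggerThan6 0, pvIdx biggerThan6 1)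
          else if i = 2 then (pvIdx smallerThan6 3, pvIdx smallerThan6 4, pvIdx biggerThan6 0)
          else if i = 3 then (pvIdx smallerThan6 3, pvIdx smallerThan6 4, pvIdx smallerThan6 5)
          else ((0 : Int), (0 : Int), (0 : Int))
        else if smallerThan6.length = 3 then
          (pvIdx biggerThan6 0, pvIdx biggerThan6 1, pvIdx biggerThan6 2)
        else ((0 : Int), (0 : Int), (0 : Int))
      PySem.Int.toStr r0 ++ PySem.Int.toStr rest.1 ++ ":" ++ PySem.Int.toStr r2 ++
        PySem.Int.toStr rest.2.1 ++ ":" ++ PySem.Int.toStr r4 ++ PySem.Int.toStr rest.2.2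

-- ===== PORT B =====
def solution_alt (A : Int) (B : Int) (C : Int) (D : Int) (E : Int) (F : Int) : String :=
  let n := PySem.List.sorted [A, B, C, D, E, F] (fun x => x) false
  if pvIdx n 2 ≥ 6 || pvIdx n 0 ≥ 2 then "NOT POSSIBLE"
  else
    PySem.Int.toStr (pvIdx n 0) ++ PySem.Int.toStr (pvIdx n 3) ++ ":" ++
      PySem.Int.toStr (pvIdx n 1) ++ PySem.Int.toStr (pvIdx n 4) ++ ":" ++
      PySem.Int.toStr (pvIdx n 2) ++ PySem.Int.toStr (pvIdx n 5)

-- ===== PRECONDITION & SPEC =====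
def Spec_solution (A : Int) (B : Int) (C : Int) (D : Int) (E : Int) (F : Int) (out : String) : Prop := out = solution_alt A B C D E F
instance (A : Int) (B : Int) (C : Int) (D : Int) (E : Int) (F : Int) (out : String) : Decidable (Spec_solution A B C D E F out) := by unfold Spec_solution; infer_instance

-- ===== CLAIM (what is proved, stated in full; the proofs are below) =====
def Claim_equal_solution : Prop := ∀ (A : Int) (B : Int) (C : Int) (D : Int) (E : Int) (F : Int), Dom_solution A B C D E F → Spec_solution A B C D E F (solution A B C D E F)

-- ===== LEMMAS AND PROOFS =====

-- The whole computation depends only on the sorted list; on a ≤-chain of six values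
-- both ports produce the same string.
lemma key_lemma (a b c d e f : Int) (h1 : a ≤ b) (h2 : b ≤ c) (h3 : c ≤ d)
    (h4 : d ≤ e) (h5 : e ≤ f) :
    (let numbers := [a, b, c, d, e, f]
     let smallerThan6 := numbers.filter (fun i => decide (i < 6))
     let biggerThan6 := numbers.filter (fun i => decide (i ≥ 6))
     if smallerThan6.length < 3 then "NOT POSSIBLE"
     else
       let r0 := pvIdx smallerThan6 0
       let r2 := pvIdx smallerThan6 1
       let r4 := pvIdx smallerThan6 2
       if r0 ≥ 2 then "NOT POSSIBLE"
       else
         let rest :=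
           if smallerThan6.length > 3 then
             let i : Int := (smallerThan6.length : Int) - 3
             if i = 1 then (pvIdx smallerThan6 3, pvIdx biggerThan6 0, pvIdx biggerThan6 1)
             else if i = 2 then (pvIdx smallerThan6 3, pvIdx smallerThan6 4, pvIdx biggerThan6 0)
             else if i = 3 then (pvIdx smallerThan6 3, pvIdx smallerThan6 4, pvIdx smallerThan6 5)
             else ((0 : Int), (0 : Int), (0 : Int))
           else if smallerThan6.length = 3 then
             (pvIdx biggerThan6 0, pvIdx biggerThan6 1, pvIdx biggerThan6 2)
           else ((0 : Int), (0 : Int), (0 : Int))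
         PySem.Int.toStr r0 ++ PySem.Int.toStr rest.1 ++ ":" ++ PySem.Int.toStr r2 ++
           PySem.Int.toStr rest.2.1 ++ ":" ++ PySem.Int.toStr r4 ++ PySem.Int.toStr rest.2.2) =
    (let n := [a, b, c, d, e, f]
     if pvIdx n 2 ≥ 6 || pvIdx n 0 ≥ 2 then "NOT POSSIBLE"
     else
       PySem.Int.toStr (pvIdx n 0) ++ PySem.Int.toStr (pvIdx n 3) ++ ":" ++
         PySem.Int.toStr (pvIdx n 1) ++ PySem.Int.toStr (pvIdx n 4) ++ ":" ++
         PySem.Int.toStr (pvIdx n 2) ++ PySem.Int.toStr (pvIdx n 5)) := by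
  by_cases hc : c < 6
  · have ha : a < 6 := by omega
    have hb : b < 6 := by omega
    have hc6 : ¬ 6 ≤ c := by omega
    by_cases hd : d < 6
    · by_cases he : e < 6
      · by_cases hf : f < 6
        · simp [pvIdx, PySem.List.pyGet?, PySem.List.pyIdx?, ha, hb, hc, hd, he, hf,
            hc6] <;> split_ifs <;> first | rfl | omega
        · have hf6 : 6 ≤ f := by omega
          simp [pvIdx, PySem.List.pyGet?, PySem.List.pyIdx?, ha, hb, hc, hd, he, hf,
            hc6, hf6] <;> split_ifs <;> first | rfl | omega
      · have he6 : 6 ≤ e := by omega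
        have hf : ¬ f < 6 := by omega
        have hf6 : 6 ≤ f := by omega
        simp [pvIdx, PySem.List.pyGet?, PySem.List.pyIdx?, ha, hb, hc, hd, he, hf,
          hc6, he6, hf6] <;> split_ifs <;> first | rfl | omega
    · have hd6 : 6 ≤ d := by omega
      have he : ¬ e < 6 := by omega
      have he6 : 6 ≤ e := by omega
      have hf : ¬ f < 6 := by omega
      have hf6 : 6 ≤ f := by omega
      simp [pvIdx, PySem.List.pyGet?, PySem.List.pyIdx?, ha, hb, hc, hd, he, hf,
        hc6, hd6, he6, hf6] <;> split_ifs <;> first | rfl | omega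
  · have hc6 : 6 ≤ c := by omega
    have hd : ¬ d < 6 := by omega
    have hd6 : 6 ≤ d := by omega
    have he : ¬ e < 6 := by omega
    have he6 : 6 ≤ e := by omega
    have hf : ¬ f < 6 := by omega
    have hf6 : 6 ≤ f := by omega
    by_cases ha : a < 6
    · by_cases hb : b < 6
      · simp [pvIdx, PySem.List.pyGet?, PySem.List.pyIdx?, ha, hb, hc, hd, he, hf,
          hc6, hd6, he6, hf6] <;> split_ifs <;> first | rfl | omega
      · have hb6 : 6 ≤ b := by omega
        simp [pvIdx, PySem.List.pyGet?, PySem.List.pyIdx?, ha, hb, hc, hd, he, hf,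
          hb6, hc6, hd6, he6, hf6] <;> split_ifs <;> first | rfl | omega
    · have ha6 : 6 ≤ a := by omega
      have hb : ¬ b < 6 := by omega
      have hb6 : 6 ≤ b := by omega
      simp [pvIdx, PySem.List.pyGet?, PySem.List.pyIdx?, ha, hb, hc, hd, he, hf,
        ha6, hb6, hc6, hd6, he6, hf6] <;> split_ifs <;> first | rfl | omega

-- a list of length 6 is a literal sextuple
lemma six_exists (l : List Int) (h : l.length = 6) :
    ∃ a b c d e f : Int, l = [a, b, c, d, e, f] := by
  rcases l with _ | ⟨a, _ | ⟨b, _ | ⟨c, _ | ⟨d, _ | ⟨e, _ | ⟨f, _ | ⟨g, t⟩⟩⟩⟩⟩⟩⟩ <;>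
    simp_all

-- ===== VERDICT (by name: the statement is the Claim_ definition above) =====
theorem solution_spec : Claim_equal_solution := by
  intro A B C D E F _
  have hl : (PySem.List.sorted [A, B, C, D, E, F] (fun x => x) false).length = 6 := by
    rw [PySem.List.length_sorted]; rfl
  obtain ⟨a, b, c, d, e, f, hn⟩ := six_exists _ hl
  have hp := PySem.List.sorted_pairwise (xs := [A, B, C, D, E, F]) (key := fun x => x)
  rw [hn] at hp
  simp only [List.pairwise_cons] at hp
  have h1 : a ≤ b := by simp_all
  have h2 : b ≤ c := by simp_all
  have h3 : c ≤ d := by simp_all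
  have h4 : d ≤ e := by simp_all
  have h5 : e ≤ f := by simp_all
  unfold Spec_solution solution solution_alt
  rw [hn]
  exact key_lemma a b c d e f h1 h2 h3 h4 h5
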